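-- pv_equiv track=rewrite | github.com/poke1024/origami | origami/train/segment/main.py | tiles_1
-- ===== SOURCE A (Python) =====
-- MIN_TILE_OVERLAP = 50
--
-- def tiles_1(full_size, tile_size):
-- 	if tile_size == full_size:
-- 		yield 0, full_size
-- 	else:
-- 		n_steps = 2
--
-- 		while True:
-- 			overlap = int(((n_steps * tile_size) - full_size) / (n_steps - 1))
-- 			if overlap >= MIN_TILE_OVERLAP:
-- 				break
-- 			n_steps += 1
--
-- 		for i in range(0, n_steps):
-- 			y = i * (tile_size - overlap)
-- 			y -= max(0, y + tile_size - full_size)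
-- 			yield y, y + tile_size
-- ===== SOURCE B (Python) =====
-- MIN_TILE_OVERLAP = 50
--
-- def tiles_1(full_size, tile_size):
--     if tile_size == full_size:
--         yield 0, full_size
--         return
--     # floor((n*t - f)/(n-1)) >= 50  <=>  n*(t - 50) >= f - 50, so the smallest
--     # admissible step count is the ceiling of (f - 50)/(t - 50), never below 2.
--     n_steps = 2
--     if tile_size > MIN_TILE_OVERLAP:
--         n_steps = max(2, -(-(full_size - MIN_TILE_OVERLAP) // (tile_size - MIN_TILE_OVERLAP)))
--     overlap = (n_steps * tile_size - full_size) // (n_steps - 1)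
--     for i in range(n_steps):
--         y = i * (tile_size - overlap)
--         y -= max(0, y + tile_size - full_size)
--         yield y, y + tile_size
-- ===== Notes on version B (the rewrite author's own statement) =====
-- stated objective: simpler
-- what changed: A searches for n_steps by incrementing it one at a time and re-testing the overlap condition; B computes n_steps in one shot as a ceiling division clamped to 2 and derives the overlap once, keeping the identical final yield loop. Pre_ excludes only the inputs (tile_size <= 50 and 2*tile_size - full_size < 50, tile_size != full_size) on which A's while-loop never breaks and the generator never terminates.
import Mathlib
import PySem

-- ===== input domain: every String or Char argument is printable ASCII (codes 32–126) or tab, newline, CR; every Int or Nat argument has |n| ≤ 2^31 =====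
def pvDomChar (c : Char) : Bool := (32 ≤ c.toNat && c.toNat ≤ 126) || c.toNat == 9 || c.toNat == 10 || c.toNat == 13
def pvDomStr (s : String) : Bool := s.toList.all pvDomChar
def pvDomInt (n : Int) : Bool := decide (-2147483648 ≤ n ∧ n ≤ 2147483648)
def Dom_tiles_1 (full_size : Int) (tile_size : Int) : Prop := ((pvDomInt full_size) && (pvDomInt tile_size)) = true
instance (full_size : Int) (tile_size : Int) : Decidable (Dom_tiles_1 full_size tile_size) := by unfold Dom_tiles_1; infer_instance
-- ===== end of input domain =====

-- B replaces A's incremental while-search for n_steps by one ceiling division (simpler); the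
-- generators are compared by their yielded lists.

-- both Pythons end with the identical `for i in range(n_steps)` yield loop; ported once, used by both
def tilesEmit (full_size : Int) (tile_size : Int) (n_steps : Int) (overlap : Int) : List (Int × Int) :=
  (PySem.List.pyRange 0 n_steps 1).map (fun i =>
    let y := i * (tile_size - overlap)
    let y' := y - max 0 (y + tile_size - full_size)
    (y', y' + tile_size))

-- ===== PORT A =====
-- A's `while True` search; the fuel only makes it total (under Pre_ it is never exhausted).
-- `int(x / y)` here is division truncated toward zero: Int.tdiv (exact up to float rounding of
-- Python's true division, which stays exact at the magnitudes the admitted inputs produce).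
def tiles1Loop (full_size : Int) (tile_size : Int) (n_steps : Int) (fuel : Nat) : Int × Int :=
  let overlap := Int.tdiv (n_steps * tile_size - full_size) (n_steps - 1)
  if 50 ≤ overlap then (n_steps, overlap)
  else
    match fuel with
    | 0 => (n_steps, overlap)
    | fuel' + 1 => tiles1Loop full_size tile_size (n_steps + 1) fuel'

def tiles_1 (full_size : Int) (tile_size : Int) : List (Int × Int) :=
  if tile_size = full_size then [(0, full_size)]
  else
    tilesEmit full_size tile_size
      (tiles1Loop full_size tile_size 2 (full_size.toNat + 4)).1
      (tiles1Loop full_size tile_size 2 (full_size.toNat + 4)).2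

-- ===== PORT B =====
-- B's step count: `max(2, -(-(full_size - 50) // (tile_size - 50)))` when tile_size > 50, else 2
def altSteps (full_size : Int) (tile_size : Int) : Int :=
  if 50 < tile_size then
    max 2 (-(PySem.Int.floordiv (-(full_size - 50)) (tile_size - 50)))
  else 2

def tiles_1_alt (full_size : Int) (tile_size : Int) : List (Int × Int) :=
  if tile_size = full_size then [(0, full_size)]
  else
    tilesEmit full_size tile_size (altSteps full_size tile_size)
      (PySem.Int.floordiv (altSteps full_size tile_size * tile_size - full_size)
                          (altSteps full_size tile_size - 1))

-- ===== PRECONDITION & SPEC =====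
-- Pre_ excludes exactly the inputs on which A's while-loop never breaks (the generator never
-- terminates): tile_size ≠ full_size with tile_size ≤ 50 and 2*tile_size - full_size < 50.
def Pre_tiles_1 (full_size : Int) (tile_size : Int) : Prop :=
  tile_size = full_size ∨ 50 ≤ 2 * tile_size - full_size ∨ 51 ≤ tile_size
instance (full_size : Int) (tile_size : Int) : Decidable (Pre_tiles_1 full_size tile_size) := by
  unfold Pre_tiles_1; infer_instance

def pvWitness_tiles_1 : Int × Int := (200, 100)

def Spec_tiles_1 (full_size : Int) (tile_size : Int) (out : List (Int × Int)) : Prop := out = tiles_1_alt full_size tile_size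
instance (full_size : Int) (tile_size : Int) (out : List (Int × Int)) : Decidable (Spec_tiles_1 full_size tile_size out) := by unfold Spec_tiles_1; infer_instance

-- ===== CLAIM (what is proved, stated in full; the proofs are below) =====
def Claim_equal_tiles_1 : Prop := ∀ (full_size : Int) (tile_size : Int), Dom_tiles_1 full_size tile_size → Pre_tiles_1 full_size tile_size → Spec_tiles_1 full_size tile_size (tiles_1 full_size tile_size)

-- ===== LEMMAS AND PROOFS =====

-- truncating division compared with 50, positive divisor
lemma tdiv_ge50_iff (q d : Int) (hd : 0 < d) : 50 ≤ Int.tdiv q d ↔ 50 * d ≤ q := by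
  by_cases hq : 0 ≤ q
  · rw [Int.tdiv_eq_ediv_of_nonneg hq, Int.le_ediv_iff_mul_le hd]
  · constructor
    · intro h
      exfalso
      have h1 : 0 ≤ Int.tdiv (-q) d := Int.tdiv_nonneg (by omega) (by omega)
      have h2 : Int.tdiv q d = -(Int.tdiv (-q) d) := by
        rw [← Int.neg_tdiv, neg_neg]
      omega
    · intro h; exfalso; nlinarith

-- the loop, started at any n between 2 and the stopping point m, reaches m given enough fuel
lemma loop_reaches (f t m : Int) (ht : 51 ≤ t)
    (hlo : (m - 1) * (t - 50) < f - 50) (hhi : f - 50 ≤ m * (t - 50)) :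
    ∀ (fuel : Nat) (n : Int), 2 ≤ n → n ≤ m → m - n ≤ (fuel : Int) →
      tiles1Loop f t n fuel = (m, Int.tdiv (m * t - f) (m - 1)) := by
  intro fuel
  induction fuel with
  | zero =>
    intro n h2 hnm hfuel
    have hn : n = m := by omega
    subst hn
    have hcond : 50 ≤ Int.tdiv (n * t - f) (n - 1) := by
      rw [tdiv_ge50_iff _ _ (by omega)]
      nlinarith
    simp [tiles1Loop, hcond]
  | succ fuel ih =>
    intro n h2 hnm hfuel
    by_cases hn : n = m
    · subst hn
      have hcond : 50 ≤ Int.tdiv (n * t - f) (n - 1) := by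
        rw [tdiv_ge50_iff _ _ (by omega)]
        nlinarith
      simp [tiles1Loop, hcond]
    · have hlt : n < m := lt_of_le_of_ne hnm hn
      have hcond : ¬ 50 ≤ Int.tdiv (n * t - f) (n - 1) := by
        rw [tdiv_ge50_iff _ _ (by omega)]
        have h1 : (n - 1) * (t - 50) ≤ (m - 1) * (t - 50) :=
          mul_le_mul_of_nonneg_right (by omega) (by omega)
        nlinarith
      simp only [tiles1Loop, if_neg hcond]
      exact ih (n + 1) (by omega) (by omega) (by omega)

-- when n = 2 already satisfies the break condition, the loop stops immediately
lemma loop_stops_at_two (f t : Int) (h : 50 ≤ 2 * t - f) (fuel : Nat) :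
    tiles1Loop f t 2 fuel = (2, 2 * t - f) := by
  cases fuel <;>
  · simp only [tiles1Loop]
    norm_num [Int.tdiv_one, h]

theorem tiles_1_spec_aux : ∀ (full_size : Int) (tile_size : Int),
    Dom_tiles_1 full_size tile_size → Pre_tiles_1 full_size tile_size →
    tiles_1 full_size tile_size = tiles_1_alt full_size tile_size := by
  intro f t _hdom hpre
  by_cases heq : t = f
  · simp [tiles_1, tiles_1_alt, heq]
  · have hmain : ∀ _h50 : 50 ≤ 2 * t - f, ∀ _hstep : altSteps f t = 2,
        tiles_1 f t = tiles_1_alt f t := by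
      intro h50 hstep
      unfold tiles_1 tiles_1_alt
      rw [if_neg heq, if_neg heq, loop_stops_at_two f t h50, hstep]
      norm_num [PySem.Int.floordiv_eq_ediv_of_pos one_pos, Int.ediv_one]
    rcases hpre with h | h | h
    · exact absurd h heq
    · -- 2 tiles already overlap enough
      refine hmain h ?_
      unfold altSteps
      by_cases ht : 50 < t
      · rw [if_pos ht]
        have hm := (PySem.Int.neg_floordiv_neg_eq_iff_of_pos (a := f - 50)
          (b := t - 50) (q := -(PySem.Int.floordiv (-(f - 50)) (t - 50))) (by omega)).mp rfl
        have hd : (0:Int) < t - 50 := by omega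
        have : -(PySem.Int.floordiv (-(f - 50)) (t - 50)) ≤ 2 := by nlinarith [hm.1]
        omega
      · rw [if_neg ht]
    · by_cases h2 : 50 ≤ 2 * t - f
      · refine hmain h2 ?_
        unfold altSteps
        rw [if_pos (by omega)]
        have hm := (PySem.Int.neg_floordiv_neg_eq_iff_of_pos (a := f - 50)
          (b := t - 50) (q := -(PySem.Int.floordiv (-(f - 50)) (t - 50))) (by omega)).mp rfl
        have : -(PySem.Int.floordiv (-(f - 50)) (t - 50)) ≤ 2 := by nlinarith [hm.1]
        omega
      · -- the loop really runs: m ≥ 3 steps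
        set d : Int := t - 50 with hd
        have hdpos : 0 < d := by omega
        set m : Int := -(PySem.Int.floordiv (-(f - 50)) d) with hm
        obtain ⟨hlo, hhi⟩ :=
          (PySem.Int.neg_floordiv_neg_eq_iff_of_pos (a := f - 50) (b := d) (q := m) hdpos).mp hm.symm
        have hm3 : 3 ≤ m := by nlinarith [hlo, hhi]
        have hstep : altSteps f t = m := by
          unfold altSteps
          rw [if_pos (by omega), ← hd, ← hm]
          omega
        have hfuel : m - 2 ≤ ((f.toNat + 4 : Nat) : Int) := by
          have h1 : m - 1 ≤ (m - 1) * d := by nlinarith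
          have h2' : (0:Int) ≤ f := by omega
          omega
        have hpos : 0 ≤ m * t - f := by nlinarith [hhi]
        unfold tiles_1 tiles_1_alt
        rw [if_neg heq, if_neg heq,
            loop_reaches f t m h hlo hhi (f.toNat + 4) 2 (by omega) (by omega) hfuel,
            hstep, PySem.Int.floordiv_eq_ediv_of_pos (by omega : (0:Int) < m - 1),
            Int.tdiv_eq_ediv_of_nonneg hpos]

-- ===== VERDICT (by name: the statement is the Claim_ definition above) =====
theorem tiles_1_spec : Claim_equal_tiles_1 := by
  intro f t hdom hpre
  unfold Spec_tiles_1
  exact tiles_1_spec_aux f t hdom hpre
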